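-- pv_equiv track=rewrite | github.com/Just-NB/Algorithm | Programmers/weekly_challange/fatigue.py | solution
-- ===== SOURCE A (Python) =====
-- from itertools import permutations
--
-- def solution(k, dungeons):
--     answer = 0
--     d_length = len(dungeons)
--
--     per = permutations(range(d_length))
--     for p in per:
--         p_ans = 0
--         p_fat = k
--         for i in p:
--             if p_fat >= dungeons[i][0]:  # 최소 피로도.
--                 p_fat -= dungeons[i][1]  # 소모 피로도
--                 p_ans += 1
--         answer = max(p_ans, answer)
--
--     return answer
-- ===== SOURCE B (Python) =====
-- def solution(k, dungeons):
--     # Recursive backtracking: try each affordable dungeon as the next clear,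
--     # recursing on the list without it; unaffordable dungeons are pruned.
--     def best(fat, ds):
--         res = 0
--         for i in range(len(ds)):
--             mn, cost = ds[i]
--             if fat >= mn:
--                 res = max(res, 1 + best(fat - cost, ds[:i] + ds[i + 1:]))
--         return res
--     return best(k, dungeons)
-- ===== Notes on version B (the rewrite author's own statement) =====
-- stated objective: alternative
-- what changed: Replaces A's enumeration of all n! index permutations (each scanned greedily with skips) by recursive backtracking that branches only on currently-affordable dungeons and recurses on the list with that dungeon removed.
import Mathlib
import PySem

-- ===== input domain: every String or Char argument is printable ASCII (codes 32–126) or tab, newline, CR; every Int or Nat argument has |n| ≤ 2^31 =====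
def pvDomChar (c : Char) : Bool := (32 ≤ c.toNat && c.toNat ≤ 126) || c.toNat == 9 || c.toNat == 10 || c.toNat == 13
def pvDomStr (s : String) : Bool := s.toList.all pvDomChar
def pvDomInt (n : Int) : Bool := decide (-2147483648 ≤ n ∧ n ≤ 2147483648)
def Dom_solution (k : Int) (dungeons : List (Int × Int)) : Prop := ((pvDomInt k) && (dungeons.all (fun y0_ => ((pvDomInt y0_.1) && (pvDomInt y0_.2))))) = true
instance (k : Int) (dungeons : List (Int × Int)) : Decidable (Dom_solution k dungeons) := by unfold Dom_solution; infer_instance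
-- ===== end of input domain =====

-- B replaces A's enumeration of all index permutations by recursive backtracking
-- that only tries affordable dungeons as the next clear; objective: alternative algorithm.


-- ===== PORT A =====
-- literal port of A: enumerate permutations of range(len(dungeons)); for each, a greedy
-- pass over the index sequence (skip when fatigue below the minimum), keep the max count.
def solution (k : Int) (dungeons : List (Int × Int)) : Int :=
  let d_length : Int := dungeons.length
  let per := PySem.List.permutations (PySem.List.pyRange 0 d_length 1)
               (PySem.List.pyRange 0 d_length 1).length
  per.foldl (fun answer p =>
    let r := p.foldl (fun (s : Int × Int) i =>
      let d := PySem.List.pyGetD dungeons i (0, 0)   -- dungeons[i]; i always in range here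
      if s.2 ≥ d.1 then (s.1 + 1, s.2 - d.2) else s) (0, k)
    max r.1 answer) 0

-- ===== PORT B =====
-- port of Source B's best: loop over i is the recursion on the index; ds[:i]+ds[i+1:] is eraseIdx i.
def bestGo (fat : Int) (ds : List (Int × Int)) (i : Nat) (res : Int) : Int :=
  if h : i < ds.length then
    let d := ds[i]
    let res' := if fat ≥ d.1 then max res (1 + bestGo (fat - d.2) (ds.eraseIdx i) 0 0) else res
    bestGo fat ds (i + 1) res'
  else res
termination_by (ds.length, ds.length - i)
decreasing_by
  · exact Prod.Lex.left _ _ (by simpa [List.length_eraseIdx, h] using Nat.sub_lt (Nat.zero_lt_of_lt h) one_pos)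
  · exact Prod.Lex.right _ (by omega)

def solution_alt (k : Int) (dungeons : List (Int × Int)) : Int :=
  bestGo k dungeons 0 0

-- ===== PRECONDITION & SPEC =====
def Spec_solution (k : Int) (dungeons : List (Int × Int)) (out : Int) : Prop := out = solution_alt k dungeons
instance (k : Int) (dungeons : List (Int × Int)) (out : Int) : Decidable (Spec_solution k dungeons out) := by unfold Spec_solution; infer_instance

-- ===== CLAIM (what is proved, stated in full; the proofs are below) =====
def Claim_equal_solution : Prop := ∀ (k : Int) (dungeons : List (Int × Int)), Dom_solution k dungeons → Spec_solution k dungeons (solution k dungeons)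

-- ===== LEMMAS AND PROOFS =====

-- greedy count of A's inner loop, phrased over the list of (min, cost) pairs it visits
def gd : Int → List (Int × Int) → Int
  | _, [] => 0
  | fat, d :: l => if fat ≥ d.1 then 1 + gd (fat - d.2) l else gd fat l

theorem gd_eq_zero (fat : Int) (l : List (Int × Int)) (h : ∀ d ∈ l, ¬ fat ≥ d.1) :
    gd fat l = 0 := by
  induction l with
  | nil => rfl
  | cons d t ih =>
    simp only [gd, if_neg (h d (List.mem_cons_self ..))]
    exact ih (fun d hd => h d (List.mem_cons_of_mem _ hd))

theorem bestGo_ge_res (fat : Int) (ds : List (Int × Int)) (i : Nat) (res : Int) :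
    res ≤ bestGo fat ds i res := by
  fun_induction bestGo with
  | case1 fat ds i res h d res' ihA ihB ihC =>
    have ihNext : res' ≤ bestGo fat ds (i + 1) res' := by first | exact ihA | exact ihB | exact ihC
    refine le_trans ?_ ihNext
    simp only [res']; split
    · exact le_max_left _ _
    · exact le_rfl
  | case2 => exact le_rfl

theorem bestGo_branch_le (fat : Int) (ds : List (Int × Int)) (i : Nat) (res : Int)
    (j : Nat) (hij : i ≤ j) (hj : j < ds.length) (haff : fat ≥ ds[j].1) :
    1 + bestGo (fat - ds[j].2) (ds.eraseIdx j) 0 0 ≤ bestGo fat ds i res := by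
  fun_induction bestGo fat ds i res with
  | case1 fat ds i res h d res' ihA ihB ihC =>
    rcases eq_or_lt_of_le hij with rfl | hlt
    · refine le_trans ?_ (bestGo_ge_res fat ds (i + 1) res')
      simp only [res', d]
      split
      · exact le_max_right _ _
      · rename_i hc; exact absurd haff hc
    · first | exact ihA hlt hj haff | exact ihB hlt hj haff | exact ihC hlt hj haff
  | case2 fat ds i res h => omega

theorem bestGo_cases (fat : Int) (ds : List (Int × Int)) (i : Nat) (res : Int) :
    bestGo fat ds i res = res ∨
    ∃ j, i ≤ j ∧ ∃ hj : j < ds.length, fat ≥ ds[j].1 ∧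
      bestGo fat ds i res = 1 + bestGo (fat - ds[j].2) (ds.eraseIdx j) 0 0 := by
  fun_induction bestGo fat ds i res with
  | case1 fat ds i res h d res' ihA ihB ihC =>
    have ihNext : bestGo fat ds (i + 1) res' = res' ∨
        ∃ j, i + 1 ≤ j ∧ ∃ hj : j < ds.length, fat ≥ ds[j].1 ∧
          bestGo fat ds (i + 1) res' = 1 + bestGo (fat - ds[j].2) (ds.eraseIdx j) 0 0 := by
      first | exact ihA | exact ihB | exact ihC
    rcases ihNext with h2 | ⟨j, hij, hj, haff, heq⟩
    · rw [h2]; simp only [res', d]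
      split
      · rcases max_choice res (1 + bestGo (fat - ds[i].2) (ds.eraseIdx i) 0 0) with hm | hm
        · left; exact hm
        · right; exact ⟨i, le_rfl, h, by assumption, hm⟩
      · left; rfl
    · right; exact ⟨j, by omega, hj, haff, heq⟩
  | case2 => left; rfl

theorem bestGo_nonneg (fat : Int) (ds : List (Int × Int)) : 0 ≤ bestGo fat ds 0 0 :=
  bestGo_ge_res fat ds 0 0

-- the element at position j, consed onto the list without it, is a permutation of the list
theorem cons_eraseIdx_perm {α : Type} (ds : List α) (j : Nat) (hj : j < ds.length) :
    (ds[j] :: ds.eraseIdx j).Perm ds := by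
  conv_rhs => rw [← List.take_append_drop j ds]
  rw [List.eraseIdx_eq_take_drop_succ,
      (List.drop_eq_getElem_cons hj : ds.drop j = ds[j] :: ds.drop (j + 1))]
  exact (List.perm_middle).symm

-- upper bound: the greedy count of ANY subpermutation of ds is at most B's value
theorem gd_le_bestGo (l : List (Int × Int)) : ∀ (ds : List (Int × Int)) (fat : Int),
    l.Subperm ds → gd fat l ≤ bestGo fat ds 0 0 := by
  induction l with
  | nil => intro ds fat _; simpa [gd] using bestGo_nonneg fat ds
  | cons d t ih =>
    intro ds fat hsub
    have hd : d ∈ ds := hsub.subset (List.mem_cons_self ..)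
    have ht : t.Subperm (ds.erase d) := by
      have := hsub.erase d
      rwa [List.erase_cons_head] at this
    simp only [gd]
    split
    · rename_i haff
      have hj : ds.idxOf d < ds.length := List.idxOf_lt_length_of_mem hd
      have hget : ds[ds.idxOf d] = d := List.getElem_idxOf hj
      have herase : ds.erase d = ds.eraseIdx (ds.idxOf d) := by
        exact List.erase_eq_eraseIdx_of_idxOf rfl
      have hbr := bestGo_branch_le fat ds 0 0 (ds.idxOf d) (Nat.zero_le _) hj
        (by rw [hget]; assumption)
      rw [hget] at hbr
      calc 1 + gd (fat - d.2) t ≤ 1 + bestGo (fat - d.2) (ds.erase d) 0 0 := by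
              linarith [ih (ds.erase d) (fat - d.2) ht]
        _ ≤ bestGo fat ds 0 0 := by rw [herase]; exact hbr
    · exact ih ds fat (((List.sublist_cons_self d t).subperm).trans hsub)

-- attainment: B's value is the greedy count of SOME permutation of ds
theorem bestGo_attained : ∀ (n : Nat) (ds : List (Int × Int)), ds.length = n → ∀ fat : Int,
    ∃ l, l.Perm ds ∧ gd fat l = bestGo fat ds 0 0 := by
  intro n
  induction n using Nat.strong_induction_on with
  | _ n ihn =>
    intro ds hlen fat
    rcases bestGo_cases fat ds 0 0 with h0 | ⟨j, _, hj, haff, heq⟩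
    · refine ⟨ds, List.Perm.refl ds, ?_⟩
      rw [h0, gd_eq_zero]
      intro d hd hge
      obtain ⟨j, hj, rfl⟩ := List.mem_iff_getElem.mp hd
      have := bestGo_branch_le fat ds 0 0 j (Nat.zero_le _) hj hge
      have := bestGo_nonneg (fat - ds[j].2) (ds.eraseIdx j)
      omega
    · have hlen' : (ds.eraseIdx j).length < n := by
        rw [List.length_eraseIdx_of_lt hj]; omega
      obtain ⟨l', hperm', hgd'⟩ := ihn _ hlen' (ds.eraseIdx j) rfl (fat - ds[j].2)
      refine ⟨ds[j] :: l', ?_, ?_⟩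
      · exact (hperm'.cons ds[j]).trans (cons_eraseIdx_perm ds j hj)
      · simp only [gd, if_pos haff]; rw [hgd', heq]

-- A's inner fold computes gd over the mapped index list (first component)
theorem innerFold_fst (ds : List (Int × Int)) (p : List Int) :
    ∀ (a f : Int),
    (p.foldl (fun (s : Int × Int) i =>
      let d := PySem.List.pyGetD ds i (0, 0)
      if s.2 ≥ d.1 then (s.1 + 1, s.2 - d.2) else s) (a, f)).1
      = a + gd f (p.map (fun i => PySem.List.pyGetD ds i (0, 0))) := by
  induction p with
  | nil => intro a f; simp [gd]
  | cons i p ih =>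
    intro a f
    simp only [List.foldl_cons, List.map_cons, gd]
    split
    · rw [ih (a + 1) _]; ring
    · exact ih a f

-- generic running-max fold facts
theorem foldmax_ge {α : Type} (g : α → Int) (l : List α) : ∀ (c : Int),
    c ≤ l.foldl (fun a x => max (g x) a) c ∧
    ∀ x ∈ l, g x ≤ l.foldl (fun a x => max (g x) a) c := by
  induction l with
  | nil => intro c; simp
  | cons y l ih =>
    intro c
    simp only [List.foldl_cons, List.mem_cons]
    refine ⟨le_trans (le_max_right _ _) (ih _).1, ?_⟩
    rintro x (rfl | hx)
    · exact le_trans (le_max_left _ _) (ih _).1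
    · exact (ih _).2 x hx

theorem foldmax_cases {α : Type} (g : α → Int) (l : List α) : ∀ (c : Int),
    l.foldl (fun a x => max (g x) a) c = c ∨
    ∃ x ∈ l, l.foldl (fun a x => max (g x) a) c = g x := by
  induction l with
  | nil => intro c; left; rfl
  | cons y l ih =>
    intro c
    simp only [List.foldl_cons, List.mem_cons]
    rcases ih (max (g y) c) with h | ⟨x, hx, hg⟩
    · rw [h]
      rcases max_choice (g y) c with hm | hm
      · right; exact ⟨y, Or.inl rfl, hm⟩
      · left; exact hm
    · right; exact ⟨x, Or.inr hx, hg⟩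

-- a permutation of a mapped list is the map of a permutation
theorem perm_map_exists {α β : Type} (f : α → β) {l : List β} {r : List α}
    (h : l.Perm (r.map f)) : ∃ p : List α, p.Perm r ∧ l = p.map f := by
  generalize hm : r.map f = m at h
  induction h generalizing r with
  | nil =>
    have : r = [] := by cases r <;> simp_all
    exact ⟨[], by simp [this]⟩
  | cons x h ih =>
    rename_i l₁ l₂
    cases r with
    | nil => simp at hm
    | cons a r' =>
      simp only [List.map_cons, List.cons.injEq] at hm
      obtain ⟨rfl, hm'⟩ := hm
      obtain ⟨p', hp', rfl⟩ := ih hm'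
      exact ⟨a :: p', hp'.cons a, rfl⟩
  | swap x y =>
    match r, hm with
    | a :: b :: r', hm =>
      simp only [List.map_cons, List.cons.injEq] at hm
      obtain ⟨rfl, rfl, rfl⟩ := hm
      exact ⟨b :: a :: r', List.Perm.swap a b r', rfl⟩
  | trans h₁ h₂ ih₁ ih₂ =>
    obtain ⟨p₂, hp₂, rfl⟩ := ih₂ hm
    obtain ⟨p₁, hp₁, rfl⟩ := ih₁ rfl
    exact ⟨p₁, hp₁.trans hp₂, rfl⟩

-- converse of PySem.List.perm_of_mem_permutations
theorem mem_permutations_of_perm {α : Type} [DecidableEq α] : ∀ (p xs : List α), p.Perm xs →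
    p ∈ PySem.List.permutations xs xs.length := by
  intro p
  induction p with
  | nil =>
    intro xs h
    rw [List.perm_nil.mp h.symm]
    simp [PySem.List.permutations_zero]
  | cons x t ih =>
    intro xs h
    have hx : x ∈ xs := h.subset (List.mem_cons_self ..)
    have hlen : xs.length = t.length + 1 := by simpa using h.length_eq.symm
    rw [hlen, PySem.List.permutations_succ, List.mem_flatMap]
    have hj : xs.idxOf x < xs.length := List.idxOf_lt_length_of_mem hx
    refine ⟨xs.idxOf x, List.mem_range.mpr hj, ?_⟩
    rw [List.getElem?_eq_getElem hj, List.getElem_idxOf hj]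
    simp only [List.mem_map]
    refine ⟨t, ?_, rfl⟩
    have herase : xs.erase x = xs.eraseIdx (xs.idxOf x) := by
      exact List.erase_eq_eraseIdx_of_idxOf rfl
    have ht : t.Perm (xs.eraseIdx (xs.idxOf x)) := by
      rw [← herase]; exact (List.cons_perm_iff_perm_erase.mp h).2
    have : (xs.eraseIdx (xs.idxOf x)).length = t.length := by
      rw [List.length_eraseIdx_of_lt hj, hlen]; omega
    rw [← this]
    exact ih _ ht


-- dungeons as the image of the index range
theorem map_range_eq (ds : List (Int × Int)) :
    (PySem.List.pyRange 0 (ds.length : Int) 1).map (fun i => PySem.List.pyGetD ds i (0, 0)) = ds := by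
  apply List.ext_getElem
  · simp [PySem.List.length_pyRange_one]
  · intro j h1 h2
    simp only [List.getElem_map]
    rw [PySem.List.getElem_pyRange_one]
    have hj : ((0 : Int) + j) = ((j : Nat) : Int) := by omega
    rw [hj, PySem.List.pyGetD_natCast]
    exact List.getD_eq_getElem ds (0,0) h2

-- ===== VERDICT (by name: the statement is the Claim_ definition above) =====
theorem solution_spec : Claim_equal_solution := by
  intro k ds _
  unfold Spec_solution solution solution_alt
  simp only []
  set R := PySem.List.pyRange 0 (ds.length : Int) 1 with hR
  set getFn := fun i => PySem.List.pyGetD ds i (0, 0) with hget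
  set g := fun (p : List Int) =>
    (p.foldl (fun (s : Int × Int) i =>
      let d := getFn i
      if s.2 ≥ d.1 then (s.1 + 1, s.2 - d.2) else s) (0, k)).1 with hg
  have hgval : ∀ p : List Int, g p = gd k (p.map getFn) := by
    intro p; simpa using innerFold_fst ds p 0 k
  have hmapds : R.map getFn = ds := map_range_eq ds
  set per := PySem.List.permutations R R.length with hper
  have hfold : (per.foldl (fun answer p =>
      let r := p.foldl (fun (s : Int × Int) i =>
        let d := getFn i
        if s.2 ≥ d.1 then (s.1 + 1, s.2 - d.2) else s) (0, k)
      max r.1 answer) 0) = per.foldl (fun a p => max (g p) a) 0 := rfl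
  rw [hfold]
  apply le_antisymm
  · -- A ≤ B
    rcases foldmax_cases g per 0 with h0 | ⟨p, hp, heq⟩
    · rw [h0]; exact bestGo_nonneg k ds
    · rw [heq, hgval]
      apply gd_le_bestGo
      have hperm : p.Perm R := PySem.List.perm_of_mem_permutations hp
      exact ((hperm.map getFn).trans (hmapds ▸ List.Perm.refl _)).subperm
  · -- B ≤ A
    obtain ⟨l, hperm, hgd⟩ := bestGo_attained ds.length ds rfl k
    have hl : l.Perm (R.map getFn) := hperm.trans (hmapds ▸ List.Perm.refl _)
    obtain ⟨p, hpR, rfl⟩ := perm_map_exists getFn hl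
    have hmem : p ∈ per := mem_permutations_of_perm p R hpR
    calc bestGo k ds 0 0 = g p := by rw [hgval, hgd]
      _ ≤ per.foldl (fun a p => max (g p) a) 0 := (foldmax_ge g per 0).2 p hmem
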